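-- pv_equiv track=rewrite | github.com/HobbitDur/FF8UltimateEditor | IfritAI/AICompiler/AIDecompiler.py | compute_indent_bracket
-- ===== SOURCE A (Python) =====
-- from typing import List
--
-- def compute_indent_bracket(func_list: List):
--     indent = 0
--     new_text = ""
--     indent_text = "&nbsp;" * 4
--     for i in range(len(func_list)):
--         command_without_space = func_list[i].replace(' ', '')
--         if command_without_space == '}':
--             indent -= 1
--         func_list[i] = indent_text * indent + func_list[i]
--         if command_without_space == '{':
--             indent += 1
--         new_text += func_list[i] + "<br/>"
--     return func_list
-- ===== SOURCE B (Python) =====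
-- def compute_indent_bracket(func_list):
--     # Pass 1: nesting level before each line (prefix sums of bracket deltas).
--     levels = [0]
--     for s in func_list:
--         t = s.replace(' ', '')
--         levels.append(levels[-1] + (1 if t == '{' else -1 if t == '}' else 0))
--     # Pass 2: the indent applied to line i is min(level before, level after),
--     # clamped at 0 (Python's str * negative is '').
--     for i in range(len(func_list)):
--         func_list[i] = "&nbsp;" * (4 * max(0, min(levels[i], levels[i + 1]))) + func_list[i]
--     return func_list
-- ===== Notes on version B (the rewrite author's own statement) =====
-- stated objective: alternative
-- what changed: Replaces A's single stateful loop (decrement-before / increment-after bookkeeping plus an unused new_text accumulator) by two passes: a prefix-sum table of nesting levels, then per-line indent = min(level before, level after) clamped at 0.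
import Mathlib
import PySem

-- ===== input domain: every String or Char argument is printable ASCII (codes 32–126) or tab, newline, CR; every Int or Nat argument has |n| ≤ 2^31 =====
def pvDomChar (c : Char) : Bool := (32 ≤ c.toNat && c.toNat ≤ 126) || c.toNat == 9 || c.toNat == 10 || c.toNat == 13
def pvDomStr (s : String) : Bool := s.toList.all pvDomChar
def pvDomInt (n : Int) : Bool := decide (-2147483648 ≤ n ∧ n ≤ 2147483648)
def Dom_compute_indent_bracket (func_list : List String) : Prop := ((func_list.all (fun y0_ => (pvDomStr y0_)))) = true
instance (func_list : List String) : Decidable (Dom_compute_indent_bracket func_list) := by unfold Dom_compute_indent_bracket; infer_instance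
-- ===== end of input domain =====

-- ===== PORT A =====
-- B differs from A only in decomposition (one stateful pass vs a prefix-sum table);
-- A's unused `new_text` accumulator is not ported (it never affects the return value).
def ciA_loop : Int → List String → List String
  | _, [] => []
  | indent, s :: rest =>
    let cws := PySem.Str.replace s " " ""
    let indent1 := if cws = "}" then indent - 1 else indent
    let line := String.ofList (PySem.List.pyRepeat "&nbsp;&nbsp;&nbsp;&nbsp;".toList indent1 ++ s.toList)
    let indent2 := if cws = "{" then indent1 + 1 else indent1
    line :: ciA_loop indent2 rest

def compute_indent_bracket (func_list : List String) : List String :=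
  ciA_loop 0 func_list

-- ===== PORT B =====
-- running prefix sums of the per-line bracket deltas (B's `levels` list)
def ciB_levels : Int → List String → List Int
  | acc, [] => [acc]
  | acc, s :: rest =>
    let t := PySem.Str.replace s " " ""
    ciB_levels (acc + (if t = "{" then 1 else if t = "}" then -1 else 0)) rest
    |>.cons acc

def compute_indent_bracket_alt (func_list : List String) : List String :=
  let levels := ciB_levels 0 func_list
  (List.zip func_list (List.zip levels levels.tail)).map
    (fun p => String.ofList
      (PySem.List.pyRepeat "&nbsp;".toList (4 * max 0 (min p.2.1 p.2.2)) ++ p.1.toList))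

-- ===== PRECONDITION & SPEC =====
def Spec_compute_indent_bracket (func_list : List String) (out : List String) : Prop := out = compute_indent_bracket_alt func_list
instance (func_list : List String) (out : List String) : Decidable (Spec_compute_indent_bracket func_list out) := by unfold Spec_compute_indent_bracket; infer_instance

-- ===== CLAIM (what is proved, stated in full; the proofs are below) =====
def Claim_equal_compute_indent_bracket : Prop := ∀ (func_list : List String), Dom_compute_indent_bracket func_list → Spec_compute_indent_bracket func_list (compute_indent_bracket func_list)

-- ===== LEMMAS AND PROOFS =====

theorem pyRepeat_four_blocks (x : List Char) (n : Int) :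
    PySem.List.pyRepeat ((List.replicate 4 x).flatten) n
      = PySem.List.pyRepeat x (4 * max 0 n) := by
  unfold PySem.List.pyRepeat
  have h : (4 * max 0 n).toNat = 4 * n.toNat := by omega
  rw [h]
  induction n.toNat with
  | zero => simp
  | succ m ih =>
      have h4 : 4 * (m + 1) = 4 + 4 * m := by omega
      rw [List.replicate_succ, List.flatten_cons, ih, h4, List.replicate_add,
        List.flatten_append]

theorem ciA_loop_eq (l : List String) : ∀ (indent : Int),
    ciA_loop indent l
      = (List.zip l (List.zip (ciB_levels indent l) (ciB_levels indent l).tail)).map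
          (fun p => String.ofList
            (PySem.List.pyRepeat "&nbsp;".toList (4 * max 0 (min p.2.1 p.2.2)) ++ p.1.toList)) := by
  induction l with
  | nil => intro indent; simp [ciA_loop, ciB_levels]
  | cons s rest ih =>
      intro indent
      obtain ⟨t, hL⟩ : ∃ t, ciB_levels (indent + (if PySem.Str.replace s " " "" = "{" then 1
            else if PySem.Str.replace s " " "" = "}" then -1 else 0)) rest
          = (indent + (if PySem.Str.replace s " " "" = "{" then 1
            else if PySem.Str.replace s " " "" = "}" then -1 else 0)) :: t := by
        cases rest <;> exact ⟨_, rfl⟩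
      have hind2 : (if PySem.Str.replace s " " "" = "{" then
            (if PySem.Str.replace s " " "" = "}" then indent - 1 else indent) + 1
          else if PySem.Str.replace s " " "" = "}" then indent - 1 else indent)
          = indent + (if PySem.Str.replace s " " "" = "{" then 1
            else if PySem.Str.replace s " " "" = "}" then -1 else 0) := by
        by_cases h1 : PySem.Str.replace s " " "" = "{" <;>
          by_cases h2 : PySem.Str.replace s " " "" = "}" <;> simp_all <;> omega
      simp only [ciA_loop, ciB_levels, hind2, ih, hL, List.tail_cons, List.zip_cons_cons,
        List.map_cons, List.cons.injEq]
      refine ⟨?_, by simp⟩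
      have hrep : "&nbsp;&nbsp;&nbsp;&nbsp;".toList
          = (List.replicate 4 "&nbsp;".toList).flatten := by decide
      rw [hrep, pyRepeat_four_blocks]
      have harg : (4 * max 0 (if PySem.Str.replace s " " "" = "}" then indent - 1 else indent))
          = 4 * max 0 (min indent (indent + (if PySem.Str.replace s " " "" = "{" then 1
            else if PySem.Str.replace s " " "" = "}" then -1 else 0))) := by
        by_cases h1 : PySem.Str.replace s " " "" = "{" <;>
          by_cases h2 : PySem.Str.replace s " " "" = "}" <;> simp_all <;> omega
      rw [harg]

-- ===== VERDICT (by name: the statement is the Claim_ definition above) =====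
theorem compute_indent_bracket_spec : Claim_equal_compute_indent_bracket := by
  intro func_list _
  unfold Spec_compute_indent_bracket compute_indent_bracket compute_indent_bracket_alt
  exact ciA_loop_eq func_list 0
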